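-- pv_equiv track=rewrite | github.com/daormar/debasher | utils/panpipe_check.py | extract_processes_with_multiattempt
-- ===== SOURCE A (Python) =====
-- def extract_process_name(entry):
--     fields=entry.split()
--     if len(fields)==0:
--         return ""
--     else:
--         return fields[0]
--
-- def extract_time_value(entry):
--     fields=entry.split()
--     i=0
--     found=False
--     value=""
--     while i<len(fields) and not found:
--         if fields[i].find("time=")==0:
--             found=True
--             value=fields[i][5:]
--         else:
--             i=i+1
--     return value
--
-- def extract_mem_value(entry):
--     fields=entry.split()
--     i=0
--     found=False
--     value=""
--     while i<len(fields) and not found: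
--         if fields[i].find("mem=")==0:
--             found=True
--             value=fields[i][4:]
--         else:
--             i=i+1
--     return value
--
-- def str_contains_commas(str):
--     if(',' in str):
--         return True
--     else:
--         return False
--
-- def extract_processes_with_multiattempt(process_entries):
--     multiattempt_processes=set()
--     for i in range(len(process_entries)):
--         sname=extract_process_name(process_entries[i])
--         time_value=extract_time_value(process_entries[i])
--         mem_value=extract_mem_value(process_entries[i])
--         if(str_contains_commas(time_value) or str_contains_commas(mem_value)):
--             multiattempt_processes.add(sname)
--     return multiattempt_processes
-- ===== SOURCE B (Python) =====
-- def extract_processes_with_multiattempt(process_entries):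
--     multiattempt_processes = set()
--     for entry in process_entries:
--         fields = entry.split()
--         kv = {}
--         for f in reversed(fields):
--             key, sep, val = f.partition('=')
--             if sep:
--                 kv[key] = val
--         if ',' in kv.get('time', '') or ',' in kv.get('mem', ''):
--             multiattempt_processes.add(fields[0] if fields else '')
--     return multiattempt_processes
-- ===== Notes on version B (the rewrite author's own statement) =====
-- stated objective: simpler
-- what changed: Instead of three helpers that each re-split the entry and prefix-scan its fields for 'time='/'mem=', B parses each entry's key=value fields once into a dict (iterating the fields reversed so the first occurrence wins) and simply looks up 'time' and 'mem'.
import Mathlib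
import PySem

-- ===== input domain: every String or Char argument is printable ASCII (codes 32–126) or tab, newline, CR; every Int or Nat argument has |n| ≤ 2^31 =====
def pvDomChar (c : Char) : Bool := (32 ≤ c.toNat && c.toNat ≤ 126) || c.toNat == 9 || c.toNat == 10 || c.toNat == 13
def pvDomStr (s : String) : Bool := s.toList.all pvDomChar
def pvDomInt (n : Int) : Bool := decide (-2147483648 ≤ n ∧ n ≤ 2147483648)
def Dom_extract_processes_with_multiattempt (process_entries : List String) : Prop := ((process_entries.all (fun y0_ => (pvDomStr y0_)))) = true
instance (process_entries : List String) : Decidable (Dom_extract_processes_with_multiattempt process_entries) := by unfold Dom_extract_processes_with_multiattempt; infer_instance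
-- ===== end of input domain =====

-- B replaces A's three per-entry prefix-scanning helpers by a different data structure:
-- each entry's "key=value" fields are parsed once (via partition) into a dict (reversed
-- iteration so the first occurrence wins) and 'time'/'mem' are looked up; objective: simpler.


-- ===== PORT A =====
def pvExtractProcessName (entry : String) : String :=
  let fields := PySem.Str.split₀ entry
  if fields.length = 0 then "" else fields.headD ""

-- the while-loop of extract_time_value: scan fields left to right, stop at the first "time=" field
def pvScanTime : List String → String
  | [] => ""
  | f :: rest =>
    if PySem.Str.find f "time=" = 0 then PySem.Str.slice f (some 5) none else pvScanTime rest

def pvExtractTimeValue (entry : String) : String :=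
  pvScanTime (PySem.Str.split₀ entry)

-- the while-loop of extract_mem_value
def pvScanMem : List String → String
  | [] => ""
  | f :: rest =>
    if PySem.Str.find f "mem=" = 0 then PySem.Str.slice f (some 4) none else pvScanMem rest

def pvExtractMemValue (entry : String) : String :=
  pvScanMem (PySem.Str.split₀ entry)

def pvStrContainsCommas (s : String) : Bool :=
  if PySem.Str.isIn "," s then true else false

def extract_processes_with_multiattempt (process_entries : List String) : List String :=
  (PySem.List.pyRange 0 (PySem.List.len process_entries)).foldl
    (fun acc i =>
      let entry := PySem.List.pyGetD process_entries i ""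
      let sname := pvExtractProcessName entry
      let time_value := pvExtractTimeValue entry
      let mem_value := pvExtractMemValue entry
      if pvStrContainsCommas time_value || pvStrContainsCommas mem_value then
        PySem.Set.add acc sname
      else acc)
    []

-- ===== PORT B =====
-- hand port of f.partition('='): split at the FIRST '=' (exact for this 1-character separator)
def pvPartitionEq (s : String) : String × String × String :=
  let i := PySem.Str.find s "="
  if i = -1 then (s, "", "")
  else (PySem.Str.slice s none (some i), "=", PySem.Str.slice s (some (i + 1)) none)

-- the 'for f in reversed(fields)' dict-building loop of B
def pvBuildKV (fields : List String) : PySem.Dict String String :=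
  fields.reverse.foldl
    (fun d f =>
      let p := pvPartitionEq f
      if p.2.1 ≠ "" then d.insert p.1 p.2.2 else d)
    PySem.Dict.empty

def extract_processes_with_multiattempt_alt (process_entries : List String) : List String :=
  process_entries.foldl
    (fun acc entry =>
      let fields := PySem.Str.split₀ entry
      let kv := pvBuildKV fields
      if PySem.Str.isIn "," (kv.getD "time" "") || PySem.Str.isIn "," (kv.getD "mem" "") then
        PySem.Set.add acc (match fields with | [] => "" | x :: _ => x)
      else acc)
    []

-- ===== PRECONDITION & SPEC =====
def Spec_extract_processes_with_multiattempt (process_entries : List String) (out : List String) : Prop := out = extract_processes_with_multiattempt_alt process_entries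
instance (process_entries : List String) (out : List String) : Decidable (Spec_extract_processes_with_multiattempt process_entries out) := by unfold Spec_extract_processes_with_multiattempt; infer_instance

-- ===== CLAIM (what is proved, stated in full; the proofs are below) =====
def Claim_equal_extract_processes_with_multiattempt : Prop := ∀ (process_entries : List String), Dom_extract_processes_with_multiattempt process_entries → Spec_extract_processes_with_multiattempt process_entries (extract_processes_with_multiattempt process_entries)

-- ===== LEMMAS AND PROOFS =====

-- `s.find(p) == 0` is exactly `s.startswith(p)`
lemma pv_go_lb (sub : List Char) : ∀ (s : List Char) (k : ℕ),
    PySem.Chars.find.go sub s k = -1 ∨ (k : ℤ) ≤ PySem.Chars.find.go sub s k := by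
  intro s
  induction s with
  | nil =>
    intro k
    unfold PySem.Chars.find.go
    split_ifs with h
    · right; exact le_refl _
    · left; rfl
  | cons f t ih =>
    intro k
    unfold PySem.Chars.find.go
    split_ifs with h
    · right; exact le_refl _
    · rcases ih (k + 1) with h' | h'
      · left; exact h'
      · right
        refine le_trans ?_ h'
        push_cast
        omega

lemma pv_go_eq_self_iff (sub s : List Char) (k : ℕ) :
    PySem.Chars.find.go sub s k = (k : ℤ) ↔ sub.isPrefixOf s = true := by
  cases s with
  | nil =>
    unfold PySem.Chars.find.go
    cases sub with
    | nil => simp [List.isPrefixOf]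
    | cons a b => simp [List.isEmpty, List.isPrefixOf]
  | cons f t =>
    unfold PySem.Chars.find.go
    split_ifs with h
    · simp [h]
    · simp only [h]
      constructor
      · intro heq
        rcases pv_go_lb sub t (k + 1) with h' | h'
        · rw [heq] at h'; omega
        · rw [heq] at h'; push_cast at h'; omega
      · intro hf; exact absurd hf (by simp)

lemma pv_find_zero_iff (s p : String) :
    (PySem.Str.find s p = 0) ↔ PySem.Str.startswith s p = true := by
  rw [PySem.Str.find_eq, PySem.Str.startswith_eq]
  unfold PySem.Chars.find PySem.Chars.startswith
  exact_mod_cast pv_go_eq_self_iff p.toList s.toList 0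

-- find for a single-character pattern = length of the prefix not containing it
lemma pv_go_single (c : Char) : ∀ (cs : List Char) (k : ℕ),
    PySem.Chars.find.go [c] cs k =
      if c ∈ cs then (((k + (cs.takeWhile (fun x => x != c)).length : ℕ)) : ℤ) else -1 := by
  intro cs
  induction cs with
  | nil =>
    intro k
    unfold PySem.Chars.find.go
    simp [List.isEmpty]
  | cons f t ih =>
    intro k
    unfold PySem.Chars.find.go
    by_cases h : f = c
    · subst h
      simp [List.isPrefixOf, List.takeWhile]
    · have hfc : (f != c) = true := by simp [bne, h]
      have hpre : ([c].isPrefixOf (f :: t)) = false := by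
        simp [List.isPrefixOf]
        exact fun hc => h hc.symm
      rw [if_neg (by simp [hpre])]
      rw [ih (k + 1)]
      have htw : (f :: t).takeWhile (fun x => x != c) = f :: t.takeWhile (fun x => x != c) := by
        simp [List.takeWhile, hfc]
      have hcft : (c ∈ f :: t) ↔ (c ∈ t) := by
        constructor
        · intro hc
          rcases List.mem_cons.1 hc with h1 | h1
          · exact absurd h1.symm h
          · exact h1
        · exact fun hc => List.mem_cons_of_mem _ hc
      by_cases hm : c ∈ t
      · rw [if_pos hm, if_pos (hcft.2 hm), htw]
        simp only [List.length_cons]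
        push_cast
        omega
      · rw [if_neg hm, if_neg (fun hc => hm (hcft.1 hc))]

lemma pv_find_eq_single (s : String) :
    PySem.Str.find s "=" =
      if '=' ∈ s.toList then (((s.toList.takeWhile (fun x => x != '=')).length : ℕ) : ℤ) else -1 := by
  rw [PySem.Str.find_eq]
  have h1 : ("=" : String).toList = ['='] := by decide
  rw [h1]
  unfold PySem.Chars.find
  rw [pv_go_single '=' s.toList 0]
  simp

-- String.toList is injective
lemma pv_toList_inj {s t : String} (h : s.toList = t.toList) : s = t := by
  have := congrArg String.ofList h
  simpa using this

-- generic first-match scan: the common shape of A's two while-loops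
def pvScanBy (p : String) (n : ℤ) : List String → String
  | [] => ""
  | f :: rest =>
    if PySem.Str.startswith f p then PySem.Str.slice f (some n) none else pvScanBy p n rest

lemma pv_scanTime_eq : ∀ l, pvScanTime l = pvScanBy "time=" 5 l := by
  intro l
  induction l with
  | nil => rfl
  | cons f t ih =>
    unfold pvScanTime pvScanBy
    by_cases h : PySem.Str.startswith f "time=" = true
    · rw [if_pos ((pv_find_zero_iff f "time=").2 h), if_pos h]
    · rw [if_neg (fun hc => h ((pv_find_zero_iff f "time=").1 hc)), if_neg h, ih]

lemma pv_scanMem_eq : ∀ l, pvScanMem l = pvScanBy "mem=" 4 l := by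
  intro l
  induction l with
  | nil => rfl
  | cons f t ih =>
    unfold pvScanMem pvScanBy
    by_cases h : PySem.Str.startswith f "mem=" = true
    · rw [if_pos ((pv_find_zero_iff f "mem=").2 h), if_pos h]
    · rw [if_neg (fun hc => h ((pv_find_zero_iff f "mem=").1 hc)), if_neg h, ih]

lemma pv_tw_prefix (w rest : List Char) (hw : ∀ c ∈ w, (c != '=') = true) :
    (w ++ '=' :: rest).takeWhile (fun x => x != '=') = w := by
  induction w with
  | nil => simp [List.takeWhile]
  | cons a t ih =>
    rw [List.cons_append, List.takeWhile_cons, hw a (by simp), if_pos rfl,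
      ih (fun c hc => hw c (by simp [hc]))]

lemma pv_partition_no (f : String) (hm : '=' ∉ f.toList) : pvPartitionEq f = (f, "", "") := by
  unfold pvPartitionEq
  rw [pv_find_eq_single, if_neg hm]
  simp

lemma pv_partition_key (f : String) (hm : '=' ∈ f.toList) :
    (pvPartitionEq f).2.1 = "=" ∧
    (pvPartitionEq f).1.toList = f.toList.takeWhile (fun x => x != '=') ∧
    (pvPartitionEq f).2.2 =
      PySem.Str.slice f (some (((f.toList.takeWhile (fun x => x != '=')).length : ℤ) + 1)) none := by
  unfold pvPartitionEq
  rw [pv_find_eq_single, if_pos hm]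
  rw [if_neg (by omega)]
  refine ⟨rfl, ?_, rfl⟩
  simp only [PySem.Str.toList_slice, PySem.Chars.slice_eq_listSlice]
  rw [PySem.List.slice_to_natCast]
  exact (List.prefix_iff_eq_take.1 (List.takeWhile_prefix _)).symm

lemma pv_dropWhile_head : ∀ (cs : List Char) (c : Char) (r : List Char),
    cs.dropWhile (fun x => x != '=') = c :: r → c = '=' := by
  intro cs
  induction cs with
  | nil => intro c r h; simp at h
  | cons a t ih =>
    intro c r h
    rw [List.dropWhile_cons] at h
    by_cases ha : (a != '=') = true
    · rw [if_pos ha] at h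
      exact ih c r h
    · rw [if_neg ha] at h
      injection h with h1 _
      subst h1
      simpa using ha

-- if partition's key equals w (and '=' occurs) then f starts with w ++ "="
lemma pv_tw_eq_imp (f : String) (w : List Char) (hm : '=' ∈ f.toList)
    (h : f.toList.takeWhile (fun x => x != '=') = w) :
    ∃ rest, f.toList = w ++ '=' :: rest := by
  have hsplit : f.toList = w ++ f.toList.dropWhile (fun x => x != '=') := by
    conv_lhs => rw [← List.takeWhile_append_dropWhile (p := fun x => x != '=') (l := f.toList)]
    rw [h]
  have hne : f.toList.dropWhile (fun x => x != '=') ≠ [] := by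
    intro hnil
    have : f.toList.takeWhile (fun x => x != '=') = f.toList := by
      have := List.takeWhile_append_dropWhile (p := fun x => x != '=') (l := f.toList)
      rw [hnil, List.append_nil] at this
      exact this
    have hpred := List.mem_takeWhile_imp (l := f.toList) (p := fun x => x != '=') (by rw [this]; exact hm)
    simp at hpred
  rcases hd : f.toList.dropWhile (fun x => x != '=') with _ | ⟨c, r⟩
  · exact absurd hd hne
  · have hc' : c = '=' := pv_dropWhile_head f.toList c r hd
    exact ⟨r, by rw [hsplit, hd, hc']⟩

lemma pv_kv_scan (w p : String) (n : ℤ) (hp : p.toList = w.toList ++ ['='])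
    (hw : ∀ c ∈ w.toList, (c != '=') = true) (hn : n = (w.toList.length : ℤ) + 1) :
    ∀ l : List String, (pvBuildKV l).getD w "" = pvScanBy p n l := by
  intro l
  induction l with
  | nil => rfl
  | cons f t ih =>
    have hcons : pvBuildKV (f :: t) =
        (let q := pvPartitionEq f
         if q.2.1 ≠ "" then (pvBuildKV t).insert q.1 q.2.2 else pvBuildKV t) := by
      unfold pvBuildKV
      rw [List.reverse_cons, List.foldl_append]
      rfl
    rw [hcons]
    by_cases hs : PySem.Str.startswith f p = true
    · -- f starts with w ++ "=": partition inserts key w with the sliced value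
      have hpref : p.toList <+: f.toList := (PySem.Chars.startswith_iff _ _).1 (by
        rw [← PySem.Str.startswith_eq]; exact hs)
      obtain ⟨rest, hrest⟩ := hpref
      have hf : f.toList = w.toList ++ '=' :: rest := by
        rw [← hrest, hp, List.append_assoc]
        rfl
      have hm : '=' ∈ f.toList := by rw [hf]; simp
      have htw : f.toList.takeWhile (fun x => x != '=') = w.toList := by
        rw [hf]; exact pv_tw_prefix w.toList rest hw
      obtain ⟨hsep, hkey, hval⟩ := pv_partition_key f hm
      have hkeyw : (pvPartitionEq f).1 = w := pv_toList_inj (by rw [hkey, htw])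
      simp only [hsep]
      rw [if_pos (by simp)]
      rw [PySem.Dict.getD_insert, hkeyw, if_pos rfl, hval, htw, ← hn]
      unfold pvScanBy
      rw [if_pos hs]
    · -- f does not start with w ++ "=": lookup of w falls through to the tail
      have hscan : pvScanBy p n (f :: t) = pvScanBy p n t := by
        show (if PySem.Str.startswith f p = true then PySem.Str.slice f (some n) none
          else pvScanBy p n t) = pvScanBy p n t
        rw [if_neg hs]
      rw [hscan, ← ih]
      by_cases hm : '=' ∈ f.toList
      · obtain ⟨hsep, hkey, _⟩ := pv_partition_key f hm
        have hkne : w ≠ (pvPartitionEq f).1 := by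
          intro he
          have htw : f.toList.takeWhile (fun x => x != '=') = w.toList := by
            rw [← hkey, ← he]
          obtain ⟨rest, hrest⟩ := pv_tw_eq_imp f w.toList hm htw
          apply hs
          rw [PySem.Str.startswith_eq]
          apply (PySem.Chars.startswith_iff _ _).2
          rw [hp, hrest]
          exact ⟨rest, by simp⟩
        simp only [hsep]
        rw [if_pos (by simp)]
        rw [PySem.Dict.getD_insert, if_neg hkne]
      · rw [pv_partition_no f hm]
        simp

set_option maxRecDepth 4000 in
lemma pv_kv_time (l : List String) : (pvBuildKV l).getD "time" "" = pvScanBy "time=" 5 l := by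
  have hp : ("time=" : String).toList = ("time" : String).toList ++ ['='] := by rfl
  have hw : ∀ c ∈ ("time" : String).toList, (c != '=') = true := by
    rw [show ("time" : String).toList = ['t', 'i', 'm', 'e'] from rfl]
    intro c hc
    fin_cases hc <;> rfl
  have hn : (5 : ℤ) = ((("time" : String).toList.length : ℕ) : ℤ) + 1 := by rfl
  exact pv_kv_scan "time" "time=" 5 hp hw hn l

set_option maxRecDepth 4000 in
lemma pv_kv_mem (l : List String) : (pvBuildKV l).getD "mem" "" = pvScanBy "mem=" 4 l := by
  have hp : ("mem=" : String).toList = ("mem" : String).toList ++ ['='] := by rfl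
  have hw : ∀ c ∈ ("mem" : String).toList, (c != '=') = true := by
    rw [show ("mem" : String).toList = ['m', 'e', 'm'] from rfl]
    intro c hc
    fin_cases hc <;> rfl
  have hn : (4 : ℤ) = ((("mem" : String).toList.length : ℕ) : ℤ) + 1 := by rfl
  exact pv_kv_scan "mem" "mem=" 4 hp hw hn l

lemma pv_name_eq (entry : String) :
    pvExtractProcessName entry =
      (match PySem.Str.split₀ entry with | [] => "" | x :: _ => x) := by
  unfold pvExtractProcessName
  cases PySem.Str.split₀ entry with
  | nil => rfl
  | cons a b => rfl

-- ===== VERDICT (by name: the statement is the Claim_ definition above) =====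
theorem extract_processes_with_multiattempt_spec : Claim_equal_extract_processes_with_multiattempt := by
  intro process_entries _
  unfold Spec_extract_processes_with_multiattempt
  unfold extract_processes_with_multiattempt extract_processes_with_multiattempt_alt
  rw [PySem.List.foldl_pyRange_zero_pyGetD process_entries ""
    (fun acc entry =>
      if pvStrContainsCommas (pvExtractTimeValue entry) || pvStrContainsCommas (pvExtractMemValue entry) then
        PySem.Set.add acc (pvExtractProcessName entry)
      else acc) []]
  have hfun : (fun (acc : List String) (entry : String) =>
      if pvStrContainsCommas (pvExtractTimeValue entry) || pvStrContainsCommas (pvExtractMemValue entry) then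
        PySem.Set.add acc (pvExtractProcessName entry)
      else acc)
      = (fun (acc : List String) (entry : String) =>
      let fields := PySem.Str.split₀ entry
      let kv := pvBuildKV fields
      if PySem.Str.isIn "," (kv.getD "time" "") || PySem.Str.isIn "," (kv.getD "mem" "") then
        PySem.Set.add acc (match fields with | [] => "" | x :: _ => x)
      else acc) := by
    funext acc entry
    show _ = (if PySem.Str.isIn "," ((pvBuildKV (PySem.Str.split₀ entry)).getD "time" "") ||
        PySem.Str.isIn "," ((pvBuildKV (PySem.Str.split₀ entry)).getD "mem" "") then
        PySem.Set.add acc (match PySem.Str.split₀ entry with | [] => "" | x :: _ => x)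
      else acc)
    rw [pv_kv_time, pv_kv_mem, ← pv_scanTime_eq, ← pv_scanMem_eq, ← pv_name_eq]
    simp [pvStrContainsCommas, pvExtractTimeValue, pvExtractMemValue]
  rw [hfun]
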